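-- pv_equiv track=rewrite | github.com/vroomvroomO/tf | update_playlist.py | parse_blocchi
-- ===== SOURCE A (Python) =====
-- def parse_blocchi(m3u_text):
--     lines = m3u_text.splitlines()
--     blocchi = []
--     blocco_corrente = []
--     for line in lines:
--         if line.startswith("#EXTINF:"):
--             if blocco_corrente:
--                 blocchi.append(blocco_corrente)
--             blocco_corrente = [line]
--         elif blocco_corrente:
--             blocco_corrente.append(line)
--     if blocco_corrente:
--         blocchi.append(blocco_corrente)
--     return blocchi
-- ===== SOURCE B (Python) =====
-- def parse_blocchi(m3u_text):
--     lines = m3u_text.splitlines()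
--     # drop everything before the first "#EXTINF:" marker
--     while lines and not lines[0].startswith("#EXTINF:"):
--         lines = lines[1:]
--     blocks = []
--     while lines:
--         # lines[0] is a marker: the block runs up to (not including) the next marker
--         j = 1
--         while j < len(lines) and not lines[j].startswith("#EXTINF:"):
--             j += 1
--         blocks.append(lines[:j])
--         lines = lines[j:]
--     return blocks
-- ===== Notes on version B (the rewrite author's own statement) =====
-- stated objective: simpler
-- what changed: Replaces the running blocco_corrente accumulator and double flush logic with a splitter: drop the pre-marker prefix, then repeatedly cut off one block reaching to the next marker.
import Mathlib
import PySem

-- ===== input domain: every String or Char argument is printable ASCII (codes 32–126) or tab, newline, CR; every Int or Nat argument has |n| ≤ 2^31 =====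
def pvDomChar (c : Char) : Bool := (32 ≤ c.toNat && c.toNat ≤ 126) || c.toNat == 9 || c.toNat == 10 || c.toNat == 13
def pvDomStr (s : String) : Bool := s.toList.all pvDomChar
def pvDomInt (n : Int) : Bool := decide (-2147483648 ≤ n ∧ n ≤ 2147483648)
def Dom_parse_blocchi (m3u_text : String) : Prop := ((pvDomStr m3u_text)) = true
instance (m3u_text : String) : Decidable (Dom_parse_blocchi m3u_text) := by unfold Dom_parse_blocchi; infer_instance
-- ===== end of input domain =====

-- B replaces A's running-accumulator fold (blocco_corrente + double flush) by a splitter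
-- that drops the pre-marker prefix and repeatedly cuts one block up to the next marker (objective: simpler).


-- ===== PORT A =====
-- one step of A's for-loop: state = (blocchi, blocco_corrente)
def pvStepA (acc : List (List String) × List String) (line : String) :
    List (List String) × List String :=
  if PySem.Str.startswith line "#EXTINF:" then
    ((if acc.2.isEmpty then acc.1 else acc.1 ++ [acc.2]), [line])
  else if acc.2.isEmpty then acc
  else (acc.1, acc.2 ++ [line])

-- A's final flush of blocco_corrente
def pvFinishA (st : List (List String) × List String) : List (List String) :=
  if st.2.isEmpty then st.1 else st.1 ++ [st.2]

def parse_blocchi (m3u_text : String) : List (List String) :=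
  let lines := PySem.Str.splitlines m3u_text
  pvFinishA (lines.foldl pvStepA ([], []))

-- ===== PORT B =====
def pvIsMark (l : String) : Bool := PySem.Str.startswith l "#EXTINF:"

-- the inner scan-and-cut loop of B: head is a marker, take until the next marker, recurse
def pvBlocks : List String → List (List String)
  | [] => []
  | h :: t =>
      (h :: t.takeWhile (fun l => !pvIsMark l)) :: pvBlocks (t.dropWhile (fun l => !pvIsMark l))
termination_by xs => xs.length
decreasing_by
  simp only [List.length_cons]
  exact Nat.lt_succ_of_le (List.length_dropWhile_le _ _)

def parse_blocchi_alt (m3u_text : String) : List (List String) :=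
  pvBlocks ((PySem.Str.splitlines m3u_text).dropWhile (fun l => !pvIsMark l))

-- ===== PRECONDITION & SPEC =====
def Spec_parse_blocchi (m3u_text : String) (out : List (List String)) : Prop := out = parse_blocchi_alt m3u_text
instance (m3u_text : String) (out : List (List String)) : Decidable (Spec_parse_blocchi m3u_text out) := by unfold Spec_parse_blocchi; infer_instance

-- ===== CLAIM (what is proved, stated in full; the proofs are below) =====
def Claim_equal_parse_blocchi : Prop := ∀ (m3u_text : String), Dom_parse_blocchi m3u_text → Spec_parse_blocchi m3u_text (parse_blocchi m3u_text)

-- ===== LEMMAS AND PROOFS =====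

-- with a NONEMPTY current block, the rest of the fold yields: close cur with the
-- non-marker prefix, then B's splitter on the remaining suffix
theorem pvFold_nonempty (lines : List String) :
    ∀ (acc : List (List String)) (cur : List String), cur ≠ [] →
    pvFinishA (lines.foldl pvStepA (acc, cur)) =
      acc ++ ((cur ++ lines.takeWhile (fun l => !pvIsMark l)) ::
              pvBlocks (lines.dropWhile (fun l => !pvIsMark l))) := by
  induction lines with
  | nil =>
      intro acc cur hcur
      simp [pvFinishA, List.isEmpty_iff, hcur, pvBlocks]
  | cons l t ih =>
      intro acc cur hcur
      by_cases hm : pvIsMark l = true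
      · have hstep : pvStepA (acc, cur) l = (acc ++ [cur], [l]) := by
          simp [pvStepA, pvIsMark] at hm ⊢
          simp [hm, hcur]
        rw [List.foldl_cons, hstep, ih (acc ++ [cur]) [l] (by simp)]
        simp [hm, pvBlocks]
      · have hstep : pvStepA (acc, cur) l = (acc, cur ++ [l]) := by
          simp [pvStepA, pvIsMark] at hm ⊢
          simp [hm, hcur]
        rw [List.foldl_cons, hstep, ih acc (cur ++ [l]) (by simp)]
        simp [hm]

-- with an EMPTY current block, the fold is exactly B: drop the prefix, then split
theorem pvFold_empty (lines : List String) : ∀ (acc : List (List String)),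
    pvFinishA (lines.foldl pvStepA (acc, [])) =
      acc ++ pvBlocks (lines.dropWhile (fun l => !pvIsMark l)) := by
  induction lines with
  | nil => intro acc; simp [pvFinishA, pvBlocks]
  | cons l t ih =>
      intro acc
      by_cases hm : pvIsMark l = true
      · have hstep : pvStepA (acc, []) l = (acc, [l]) := by
          simp [pvStepA, pvIsMark] at hm ⊢
          simp [hm]
        rw [List.foldl_cons, hstep, pvFold_nonempty t acc [l] (by simp)]
        simp [hm, pvBlocks]
      · have hstep : pvStepA (acc, []) l = (acc, []) := by
          simp [pvStepA, pvIsMark] at hm ⊢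
          simp [hm]
        rw [List.foldl_cons, hstep, ih acc]
        simp [hm]

-- ===== VERDICT (by name: the statement is the Claim_ definition above) =====
theorem parse_blocchi_spec : Claim_equal_parse_blocchi := by
  intro s _
  unfold Spec_parse_blocchi parse_blocchi parse_blocchi_alt
  simpa using pvFold_empty (PySem.Str.splitlines s) []
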